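-- pv_equiv track=rewrite | github.com/clamalo/studylm2 | multi_file.py | create_input_with_files
-- ===== SOURCE A (Python) =====
-- def create_input_with_files(file_refs, additional_text=None):
--     """
--     Create an input list with files separated by two newlines.
--     Optionally append additional text at the end.
--     """
--     input_list = []
--     for i, file_ref in enumerate(file_refs):
--         input_list.append(file_ref)
--         if i < len(file_refs) - 1:
--             input_list.append('\n\n')  # Add two new lines between files
--
--     if additional_text:
--         input_list.append(additional_text)
--
--     return input_list
-- ===== SOURCE B (Python) =====
-- def create_input_with_files(file_refs, additional_text=None):
--     """
--     Create an input list with files separated by two newlines.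
--     Optionally append additional text at the end.
--     """
--     n = len(file_refs)
--     # closed-form index map: position i holds file_refs[i // 2] for even i,
--     # a separator for odd i; range(2*n - 1) is empty when n == 0
--     input_list = [file_refs[i // 2] if i % 2 == 0 else '\n\n'
--                   for i in range(2 * n - 1)]
--     if additional_text:
--         input_list.append(additional_text)
--     return input_list
-- ===== Notes on version B (the rewrite author's own statement) =====
-- stated objective: alternative
-- what changed: Replaces A's enumerate-and-append loop with guarded separator insertion by a closed-form index-arithmetic comprehension over range(2*n-1): even positions map to file_refs[i//2], odd positions to the separator.
import Mathlib
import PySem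

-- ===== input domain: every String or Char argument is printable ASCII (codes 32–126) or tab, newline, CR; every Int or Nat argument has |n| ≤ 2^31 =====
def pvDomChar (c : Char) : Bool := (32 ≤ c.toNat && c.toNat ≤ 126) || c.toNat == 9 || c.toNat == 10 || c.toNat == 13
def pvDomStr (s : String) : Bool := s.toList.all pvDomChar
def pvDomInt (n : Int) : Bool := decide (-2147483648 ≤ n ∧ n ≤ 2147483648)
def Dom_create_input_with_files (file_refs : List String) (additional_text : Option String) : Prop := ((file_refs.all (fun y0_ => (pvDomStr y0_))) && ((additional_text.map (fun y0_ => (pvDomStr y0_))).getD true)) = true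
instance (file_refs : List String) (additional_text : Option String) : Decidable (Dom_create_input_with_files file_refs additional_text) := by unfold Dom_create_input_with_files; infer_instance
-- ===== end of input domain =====

-- B replaces A's enumerate-and-append loop (with its index-vs-length guard) by a
-- closed-form index-arithmetic comprehension over range(2*n-1) (objective: alternative).

-- ===== PORT A =====
def create_input_with_files (file_refs : List String) (additional_text : Option String) : List String :=
  let input_list : List String := []
  -- for i, file_ref in enumerate(file_refs): append file_ref; if i < len(file_refs)-1: append '\n\n'
  let input_list := (PySem.List.enumerate file_refs).foldl
    (fun acc p =>
      let acc := acc ++ [p.2]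
      if p.1 < (file_refs.length : Int) - 1 then acc ++ ["\n\n"] else acc)
    input_list
  -- if additional_text: input_list.append(additional_text)
  match additional_text with
  | some t => if t ≠ "" then input_list ++ [t] else input_list
  | none => input_list

-- ===== PORT B =====
def create_input_with_files_alt (file_refs : List String) (additional_text : Option String) : List String :=
  let n : Int := file_refs.length
  -- [file_refs[i // 2] if i % 2 == 0 else '\n\n' for i in range(2 * n - 1)]
  -- the index i // 2 is always in range (0 ≤ i < 2*n - 1), so pyGetD's default is never used
  let input_list := (PySem.List.pyRange 0 (2 * n - 1) 1).map
    (fun i => if PySem.Int.mod i 2 = 0 then PySem.List.pyGetD file_refs (PySem.Int.floordiv i 2) "" else "\n\n")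
  -- if additional_text: input_list.append(additional_text)
  match additional_text with
  | some t => if t ≠ "" then input_list ++ [t] else input_list
  | none => input_list

-- ===== PRECONDITION & SPEC =====
def Spec_create_input_with_files (file_refs : List String) (additional_text : Option String) (out : List String) : Prop := out = create_input_with_files_alt file_refs additional_text
instance (file_refs : List String) (additional_text : Option String) (out : List String) : Decidable (Spec_create_input_with_files file_refs additional_text out) := by unfold Spec_create_input_with_files; infer_instance

-- ===== CLAIM (what is proved, stated in full; the proofs are below) =====
def Claim_equal_create_input_with_files : Prop := ∀ (file_refs : List String) (additional_text : Option String), Dom_create_input_with_files file_refs additional_text → Spec_create_input_with_files file_refs additional_text (create_input_with_files file_refs additional_text)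

-- ===== LEMMAS AND PROOFS =====

theorem pvFlatMap_ne_nil {xs : List String} (h : xs ≠ []) :
    xs.flatMap (fun r => [r, "\n\n"]) ≠ [] := by
  cases xs with
  | nil => exact absurd rfl h
  | cons x t => simp [List.flatMap_cons]

-- A's enumerated loop, started at index s with s + |xs| = n, produces the
-- interleaved list with the trailing separator dropped.
theorem pvA_loop (n : Int) (xs : List String) (s : Int) (acc : List String)
    (h : s + xs.length = n) :
    (PySem.List.enumerate xs s).foldl
      (fun acc p =>
        let acc := acc ++ [p.2]
        if p.1 < n - 1 then acc ++ ["\n\n"] else acc)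
      acc
      = acc ++ (xs.flatMap (fun r => [r, "\n\n"])).dropLast := by
  induction xs generalizing s acc with
  | nil => simp [PySem.List.enumerate_nil]
  | cons x t ih =>
    rw [PySem.List.enumerate_cons, List.foldl_cons]
    cases t with
    | nil =>
      have hs : ¬ (s < n - 1) := by simp at h; omega
      simp [hs, PySem.List.enumerate_nil, List.flatMap_cons]
    | cons y u =>
      have hs : s < n - 1 := by simp at h; omega
      have hne : (y :: u).flatMap (fun r => [r, "\n\n"]) ≠ [] :=
        pvFlatMap_ne_nil (by simp)
      have h' : (s + 1) + ((y :: u).length : Int) = n := by simp at h ⊢; omega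
      simp only [hs, if_pos]
      rw [ih (s + 1) _ h']
      conv_rhs => rw [List.flatMap_cons, List.dropLast_append_of_ne_nil hne]
      simp

-- B's index comprehension from position 2*k onwards equals the interleaving of
-- the suffix 'full.drop k' with the trailing separator dropped.
theorem pvB_map (full : List String) (xs : List String) (k : Nat)
    (h : full.drop k = xs) :
    (PySem.List.pyRange (2 * (k : Int)) (2 * (full.length : Int) - 1) 1).map
      (fun i => if PySem.Int.mod i 2 = 0 then PySem.List.pyGetD full (PySem.Int.floordiv i 2) "" else "\n\n")
      = (xs.flatMap (fun r => [r, "\n\n"])).dropLast := by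
  induction xs generalizing k with
  | nil =>
    have hk : full.length ≤ k := by
      by_contra hlt
      have : full.drop k ≠ [] := by
        simp [List.drop_eq_nil_iff]; omega
      exact this h
    rw [PySem.List.pyRange_one_eq_nil (by omega : 2 * ((full.length : Int)) - 1 ≤ 2 * (k : Int))]
    simp
  | cons x t ih =>
    have hklt : k < full.length := by
      by_contra hge
      have : full.drop k = [] := by simp [List.drop_eq_nil_iff]; omega
      simp [this] at h
    have hget : full[k]? = some x := by
      have h0 : (full.drop k)[0]? = some x := by rw [h]; rfl
      simpa using h0
    have hmod0 : PySem.Int.mod (2 * (k : Int)) 2 = 0 := by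
      rw [PySem.Int.mod_eq_emod_of_pos (by omega)]; omega
    have hdiv0 : PySem.Int.floordiv (2 * (k : Int)) 2 = (k : Int) := by
      rw [PySem.Int.floordiv_eq_ediv_of_pos (by omega)]; omega
    have hgetD : PySem.List.pyGetD full (k : Int) "" = x := by
      rw [PySem.List.pyGetD_natCast]
      simp [List.getD, hget]
    cases t with
    | nil =>
      have hlen : full.length = k + 1 := by
        have := congrArg List.length h
        simp at this; omega
      rw [PySem.List.pyRange_one_cons (by push_cast [hlen]; omega)]
      rw [PySem.List.pyRange_one_eq_nil (by push_cast [hlen]; omega)]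
      simp [hgetD, List.flatMap_cons]
    | cons y u =>
      have hlen : k + 2 ≤ full.length := by
        have := congrArg List.length h
        simp at this; omega
      rw [PySem.List.pyRange_one_cons (by omega)]
      rw [PySem.List.pyRange_one_cons (by omega)]
      have hmod1 : ¬ PySem.Int.mod (2 * (k : Int) + 1) 2 = 0 := by
        rw [PySem.Int.mod_eq_emod_of_pos (by omega)]; omega
      have hdrop' : full.drop (k + 1) = y :: u := by
        have h1 : full.drop (k + 1) = (full.drop k).drop 1 := by
          rw [List.drop_drop]
        rw [h1, h]; rfl
      have hrange : (2 * (k : Int)) + 1 + 1 = 2 * ((k + 1 : Nat) : Int) := by push_cast; ring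
      rw [List.map_cons, List.map_cons, hrange, ih (k + 1) hdrop']
      have hne : (y :: u).flatMap (fun r => [r, "\n\n"]) ≠ [] :=
        pvFlatMap_ne_nil (by simp)
      conv_rhs => rw [List.flatMap_cons, List.dropLast_append_of_ne_nil hne]
      simp [hgetD]

-- ===== VERDICT (by name: the statement is the Claim_ definition above) =====
theorem create_input_with_files_spec : Claim_equal_create_input_with_files := by
  intro file_refs additional_text _
  unfold Spec_create_input_with_files
  have hA := pvA_loop ((file_refs.length : Int)) file_refs 0 [] (by simp)
  have hB := pvB_map file_refs file_refs 0 (by simp)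
  simp only [create_input_with_files, create_input_with_files_alt]
  rw [hA]
  simp only [Nat.cast_zero, mul_zero] at hB
  rw [hB]
  simp
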